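-- pv_equiv track=rewrite | github.com/jamesroberts/adventofcode2020 | day6/day6.py | yes_questions
-- ===== SOURCE A (Python) =====
-- def yes_questions(data):
--     group = set()
--     totals = []
--     data.append('\n') # Handle the last group
--     for l in data:
--         if l == '\n':
--             totals.append(len(group))
--             group = set()
--         else:
--             for c in l.strip():
--                 group.add(c)
--
--     return sum(totals)
-- ===== SOURCE B (Python) =====
-- def yes_questions(data):
--     data.append('\n')  # Handle the last group (same in-place mutation as the original)
--     total = 0
--     rest = data
--     while '\n' in rest:
--         i = rest.index('\n')
--         total += len({c for s in rest[:i] for c in s.strip()})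
--         rest = rest[i + 1:]
--     return total
-- ===== Notes on version B (the rewrite author's own statement) =====
-- stated objective: alternative
-- what changed: Instead of a single element-wise state machine with a running char-set and a totals list reset at blank lines, B repeatedly finds the next '\n' with list.index, takes the slice before it as one group, adds the size of the union set of that slice's stripped lines, and continues on the slice after it.
import Mathlib
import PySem

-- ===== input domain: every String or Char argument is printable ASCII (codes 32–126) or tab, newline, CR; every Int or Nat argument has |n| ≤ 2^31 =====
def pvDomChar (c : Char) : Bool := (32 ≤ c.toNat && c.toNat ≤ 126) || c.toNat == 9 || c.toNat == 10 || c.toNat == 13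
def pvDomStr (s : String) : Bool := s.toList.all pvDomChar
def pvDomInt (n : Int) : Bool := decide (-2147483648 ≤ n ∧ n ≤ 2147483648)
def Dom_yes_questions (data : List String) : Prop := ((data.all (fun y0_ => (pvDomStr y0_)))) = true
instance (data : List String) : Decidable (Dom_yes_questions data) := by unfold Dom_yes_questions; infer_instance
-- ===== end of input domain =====

-- B finds each group by list.index('\n') and slicing instead of A's running set + totals reset;
-- both mutate the Python argument the same way (append '\n'); the equivalence is about the return value.

-- ===== PORT A =====
-- one loop iteration: flush the group at '\n', otherwise add the stripped line's chars
def yesStep (st : PySem.Set Char × List Int) (l : String) : PySem.Set Char × List Int :=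
  if l = "\n" then (PySem.Set.empty, st.2 ++ [(st.1.length : Int)])
  else ((PySem.Str.strip l).toList.foldl PySem.Set.add st.1, st.2)

def yes_questions (data : List String) : Int :=
  (((data ++ ["\n"]).foldl yesStep (PySem.Set.empty, ([] : List Int))).2).sum

-- ===== PORT B =====
-- while '\n' in rest: i = rest.index('\n'); total += len({c for s in rest[:i] for c in s.strip()}); rest = rest[i+1:]
-- (rest.index cannot raise under the 'in' guard: the membership proof feeds Option.get)
def altLoop (total : Int) (rest : List String) : Int :=
  if hm : "\n" ∈ rest then
    let i := (PySem.List.index? rest "\n").get ((Iff.mpr (PySem.List.index?_isSome_iff _ _) hm))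
    altLoop (total + ((PySem.Set.ofList ((PySem.List.slice rest none (some (i : Int))).flatMap
        (fun s => (PySem.Str.strip s).toList))).length : Int))
      (PySem.List.slice rest (some ((i : Int) + 1)) none)
  else total
termination_by rest.length
decreasing_by
  have h : PySem.List.index? rest "\n" = some i := (Option.some_get _).symm
  obtain ⟨hk, -, -⟩ := PySem.List.getElem_of_index?_eq_some h
  have hc : ((i : Int) + 1) = ((i + 1 : Nat) : Int) := by push_cast; ring
  rw [hc, PySem.List.slice_from_natCast, List.length_drop]
  omega

def yes_questions_alt (data : List String) : Int :=
  altLoop 0 (data ++ ["\n"])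

-- ===== PRECONDITION & SPEC =====
def Spec_yes_questions (data : List String) (out : Int) : Prop := out = yes_questions_alt data
instance (data : List String) (out : Int) : Decidable (Spec_yes_questions data out) := by unfold Spec_yes_questions; infer_instance

-- ===== CLAIM (what is proved, stated in full; the proofs are below) =====
def Claim_equal_yes_questions : Prop := ∀ (data : List String), Dom_yes_questions data → Spec_yes_questions data (yes_questions data)

-- ===== LEMMAS AND PROOFS =====

-- A's fold over a prefix with no '\n' only accumulates chars into the group
theorem foldl_yesStep_no_newline (pre : List String) (hp : "\n" ∉ pre)
    (g : PySem.Set Char) (ts : List Int) :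
    pre.foldl yesStep (g, ts)
      = (pre.foldl (fun g l => (PySem.Str.strip l).toList.foldl PySem.Set.add g) g, ts) := by
  induction pre generalizing g with
  | nil => rfl
  | cons x xs ih =>
      have hx : x ≠ "\n" := fun hxx => hp (hxx ▸ List.mem_cons_self)
      simp only [List.foldl_cons, yesStep, if_neg hx]
      exact ih (fun hm => hp (List.mem_cons_of_mem _ hm)) _

-- folding Set.add over the flatMap of stripped lines = the per-line nested fold
theorem foldl_add_flatMap (pre : List String) (g : PySem.Set Char) :
    (pre.flatMap (fun s => (PySem.Str.strip s).toList)).foldl PySem.Set.add g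
      = pre.foldl (fun g l => (PySem.Str.strip l).toList.foldl PySem.Set.add g) g := by
  induction pre generalizing g with
  | nil => rfl
  | cons x xs ih => simp only [List.flatMap_cons, List.foldl_append, List.foldl_cons]; exact ih _

-- one altLoop step on pre ++ "\n" :: suf with "\n" ∉ pre
theorem altLoop_step (pre suf : List String) (hp : "\n" ∉ pre) (total : Int) :
    altLoop total (pre ++ "\n" :: suf)
      = altLoop (total + ((PySem.Set.ofList (pre.flatMap (fun s => (PySem.Str.strip s).toList))).length : Int)) suf := by
  have hm : "\n" ∈ pre ++ "\n" :: suf := by simp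
  have hidx : PySem.List.index? (pre ++ "\n" :: suf) "\n" = some pre.length :=
    Iff.mpr (PySem.List.index?_eq_some_iff _ _ _) ⟨pre, suf, rfl, rfl, hp⟩
  rw [altLoop, dif_pos hm]
  simp only [hidx, Option.get_some]
  have hc : ((pre.length : Int) + 1) = ((pre.length + 1 : Nat) : Int) := by push_cast; ring
  rw [hc, PySem.List.slice_from_natCast, PySem.List.slice_to_natCast]
  have htake : (pre ++ "\n" :: suf).take pre.length = pre := by
    simp
  have hdrop : (pre ++ "\n" :: suf).drop (pre.length + 1) = suf := by
    rw [show pre ++ "\n" :: suf = (pre ++ ["\n"]) ++ suf by simp,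
        show pre.length + 1 = (pre ++ ["\n"]).length by simp]
    exact List.drop_left
  rw [htake, hdrop]

theorem main_lemma : ∀ (n : ℕ) (lines : List String), lines.length ≤ n →
    ∀ (ts : List Int) (total : Int),
    (((lines ++ ["\n"]).foldl yesStep (PySem.Set.empty, ts)).2).sum + total
      = ts.sum + altLoop total (lines ++ ["\n"]) := by
  intro n
  induction n with
  | zero =>
      intro lines hlen ts total
      rw [List.length_eq_zero_iff.mp (Nat.le_zero.mp hlen)]
      rw [altLoop_step [] (suf := []) (by simp), altLoop, dif_neg (by simp)]
      simp [yesStep, PySem.Set.empty, PySem.Set.ofList]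
  | succ n ih =>
      intro lines hlen ts total
      by_cases hm : "\n" ∈ lines
      · -- lines = pre ++ "\n" :: suf, first occurrence
        obtain ⟨k, hk⟩ := Option.isSome_iff_exists.mp ((Iff.mpr (PySem.List.index?_isSome_iff _ _) hm))
        obtain ⟨pre, suf, hsplit, hklen, hp⟩ := Iff.mp (PySem.List.index?_eq_some_iff _ _ _) hk
        subst hsplit
        have hassoc : (pre ++ "\n" :: suf) ++ ["\n"] = pre ++ "\n" :: (suf ++ ["\n"]) := by simp
        rw [hassoc, List.foldl_append, foldl_yesStep_no_newline pre hp, List.foldl_cons]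
        simp only [yesStep, reduceIte]
        have hsuf : suf.length ≤ n := by
          have := hlen; simp [List.length_append] at this; omega
        have := ih suf hsuf (ts ++ [((pre.foldl (fun g l => (PySem.Str.strip l).toList.foldl PySem.Set.add g) PySem.Set.empty).length : Int)])
          (total + ((PySem.Set.ofList (pre.flatMap (fun s => (PySem.Str.strip s).toList))).length : Int))
        rw [altLoop_step pre (suf ++ ["\n"]) hp total]
        have hGlen : PySem.Set.ofList (pre.flatMap (fun s => (PySem.Str.strip s).toList))
            = pre.foldl (fun g l => (PySem.Str.strip l).toList.foldl PySem.Set.add g) PySem.Set.empty := by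
          rw [PySem.Set.ofList_eq_foldl, ← foldl_add_flatMap]; rfl
        rw [hGlen] at this ⊢
        simp only [List.sum_append, List.sum_cons, List.sum_nil] at this ⊢
        omega
      · -- no '\n' in lines: one group, then altLoop ends on []
        rw [List.foldl_append, foldl_yesStep_no_newline lines hm, List.foldl_cons]
        simp only [yesStep, reduceIte, List.foldl_nil]
        rw [altLoop_step lines (suf := []) hm, altLoop, dif_neg (by simp)]
        have hGlen : PySem.Set.ofList (lines.flatMap (fun s => (PySem.Str.strip s).toList))
            = lines.foldl (fun g l => (PySem.Str.strip l).toList.foldl PySem.Set.add g) PySem.Set.empty := by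
          rw [PySem.Set.ofList_eq_foldl, ← foldl_add_flatMap]; rfl
        rw [hGlen]
        simp only [List.sum_append, List.sum_cons, List.sum_nil]
        ring

-- ===== VERDICT (by name: the statement is the Claim_ definition above) =====
theorem yes_questions_spec : Claim_equal_yes_questions := by
  intro data _
  unfold Spec_yes_questions yes_questions yes_questions_alt
  have := main_lemma data.length data le_rfl [] 0
  simpa using this
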